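-- pv_equiv track=rewrite | github.com/j3drzejo/Sorting-Algorithm-Performance-Grapher | numOfOps.py | floyd_heap_sort
-- ===== SOURCE A (Python) =====
-- def floyd_heapify(arr, n, i):
--     dominant_operations = 0
--     while True:
--         left = 2 * i + 1
--         right = 2 * i + 2
--         smallest = i
--
--         dominant_operations += 1  # Increment dominant operation count
--         if left < n and arr[left] < arr[smallest]:
--             smallest = left
--
--         dominant_operations += 1  # Increment dominant operation count
--         if right < n and arr[right] < arr[smallest]:
--             smallest = right
--
--         if smallest == i:
--             break
--
--         arr[i], arr[smallest] = arr[smallest], arr[i]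
--         i = smallest
--         dominant_operations += 1
--
--     return dominant_operations
--
-- def floyd_heap_sort(arr):
--     n = len(arr)
--     dominant_operations = 0
--     for i in range(n // 2 - 1, -1, -1):
--         dominant_operations += floyd_heapify(arr, n, i)
--     for i in range(n - 1, 0, -1):
--         arr[i], arr[0] = arr[0], arr[i]
--         dominant_operations += floyd_heapify(arr, i, 0)
--     return dominant_operations
-- ===== SOURCE B (Python) =====
-- def _siftdown(arr, n, i):
--     """Sift arr[i] down in the min-heap of size n; return the number of swaps."""
--     c = 2 * i + 1
--     if c >= n:
--         return 0
--     if c + 1 < n and arr[c + 1] < arr[c]: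
--         c += 1
--     if arr[c] < arr[i]:
--         arr[i], arr[c] = arr[c], arr[i]
--         return 1 + _siftdown(arr, n, c)
--     return 0
--
-- def floyd_heap_sort(arr):
--     n = len(arr)
--     calls = 0
--     swaps = 0
--     for i in range(n // 2 - 1, -1, -1):
--         calls += 1
--         swaps += _siftdown(arr, n, i)
--     for i in range(n - 1, 0, -1):
--         arr[i], arr[0] = arr[0], arr[i]
--         calls += 1
--         swaps += _siftdown(arr, i, 0)
--     return 3 * swaps + 2 * calls
-- ===== Notes on version B (the rewrite author's own statement) =====
-- stated objective: alternative
-- what changed: B separates the operation count from the sift: a min-child sift-down helper with an early leaf return that only counts swaps, plus a call counter in the driver, and the result is recovered by the closed form 3*swaps + 2*calls instead of A's per-iteration counter threading (each of A's loop iterations costs 2 comparisons and a swap iteration 1 more, so ops per call = 3*swaps + 2).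
import Mathlib
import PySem

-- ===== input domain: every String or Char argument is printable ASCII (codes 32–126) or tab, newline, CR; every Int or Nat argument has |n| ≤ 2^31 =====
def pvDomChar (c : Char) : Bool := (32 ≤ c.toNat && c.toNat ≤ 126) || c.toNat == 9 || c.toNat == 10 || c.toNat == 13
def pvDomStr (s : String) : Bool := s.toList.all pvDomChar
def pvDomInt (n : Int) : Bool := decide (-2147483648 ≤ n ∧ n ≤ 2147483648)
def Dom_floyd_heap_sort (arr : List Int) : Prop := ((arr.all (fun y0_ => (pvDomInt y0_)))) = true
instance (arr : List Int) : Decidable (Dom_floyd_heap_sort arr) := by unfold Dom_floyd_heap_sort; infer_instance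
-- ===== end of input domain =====

-- B replaces A's counter-threading while-True heapify by a min-child sift-down that counts
-- only swaps, recovering A's count by the closed form 3*swaps + 2*calls; equivalence is about
-- the RETURN value (both Pythons mutate arr identically). Fuel (arr.length + 1, always
-- sufficient) is only a totality guard.

-- ===== PORT A =====
-- Python's simultaneous swap arr[i], arr[j] = arr[j], arr[i] (RHS read first).
def pvSwap (arr : List Int) (i j : Int) : List Int :=
  PySem.List.pySetD (PySem.List.pySetD arr i (PySem.List.pyGetD arr j 0)) j
    (PySem.List.pyGetD arr i 0)

-- A's floyd_heapify: while-True loop, state = (arr, i, dominant_operations).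
def floyd_heapifyA (fuel : Nat) (arr : List Int) (n i c : Int) : List Int × Int :=
  match fuel with
  | 0 => (arr, c)
  | fuel + 1 =>
    let left := 2 * i + 1
    let right := 2 * i + 2
    let smallest := i
    let c := c + 1
    let smallest :=
      if left < n ∧ PySem.List.pyGetD arr left 0 < PySem.List.pyGetD arr smallest 0 then left
      else smallest
    let c := c + 1
    let smallest :=
      if right < n ∧ PySem.List.pyGetD arr right 0 < PySem.List.pyGetD arr smallest 0 then right
      else smallest
    if smallest = i then (arr, c)
    else floyd_heapifyA fuel (pvSwap arr i smallest) n smallest (c + 1)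

def floyd_heap_sort (arr : List Int) : Int :=
  let n : Int := arr.length
  let fuel := arr.length + 1
  let s1 := (PySem.List.pyRange (PySem.Int.floordiv n 2 - 1) (-1) (-1)).foldl
    (fun st i => floyd_heapifyA fuel st.1 n i st.2) (arr, (0 : Int))
  let s2 := (PySem.List.pyRange (n - 1) 0 (-1)).foldl
    (fun st i => floyd_heapifyA fuel (pvSwap st.1 i 0) i 0 st.2) s1
  s2.2

-- ===== PORT B =====
-- B's _siftdown: early leaf return, min-child selection, returns (arr, number of swaps).
def pvSiftB (fuel : Nat) (arr : List Int) (n i : Int) : List Int × Int :=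
  match fuel with
  | 0 => (arr, 0)
  | fuel + 1 =>
    let c := 2 * i + 1
    if n ≤ c then (arr, 0)
    else
      let c := if c + 1 < n ∧ PySem.List.pyGetD arr (c + 1) 0 < PySem.List.pyGetD arr c 0
               then c + 1 else c
      if PySem.List.pyGetD arr c 0 < PySem.List.pyGetD arr i 0 then
        let r := pvSiftB fuel (pvSwap arr i c) n c
        (r.1, 1 + r.2)
      else (arr, 0)

-- B's driver: state (arr, calls, swaps); result is the closed form 3*swaps + 2*calls.
def floyd_heap_sort_alt (arr : List Int) : Int :=
  let n : Int := arr.length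
  let fuel := arr.length + 1
  let s1 := (PySem.List.pyRange (PySem.Int.floordiv n 2 - 1) (-1) (-1)).foldl
    (fun (st : List Int × Int × Int) i =>
      let r := pvSiftB fuel st.1 n i
      (r.1, st.2.1 + 1, st.2.2 + r.2)) (arr, (0 : Int), (0 : Int))
  let s2 := (PySem.List.pyRange (n - 1) 0 (-1)).foldl
    (fun (st : List Int × Int × Int) i =>
      let r := pvSiftB fuel (pvSwap st.1 i 0) i 0
      (r.1, st.2.1 + 1, st.2.2 + r.2)) s1
  3 * s2.2.2 + 2 * s2.2.1

-- ===== PRECONDITION & SPEC =====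
def Spec_floyd_heap_sort (arr : List Int) (out : Int) : Prop := out = floyd_heap_sort_alt arr
instance (arr : List Int) (out : Int) : Decidable (Spec_floyd_heap_sort arr out) := by unfold Spec_floyd_heap_sort; infer_instance

-- ===== CLAIM (what is proved, stated in full; the proofs are below) =====
def Claim_equal_floyd_heap_sort : Prop := ∀ (arr : List Int), Dom_floyd_heap_sort arr → Spec_floyd_heap_sort arr (floyd_heap_sort arr)

-- ===== LEMMAS AND PROOFS =====

-- A's one heapify call costs 2 comparisons per loop iteration plus 1 per swap iteration,
-- i.e. exactly 3*swaps + 2; the child A selects is B's min child.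
theorem heapifyA_eq_sift (fA : Nat) : ∀ (fB : Nat) (arr : List Int) (n i c : Int),
    0 ≤ i → i < n → n - i ≤ (fA : Int) → n - i ≤ (fB : Int) →
    floyd_heapifyA fA arr n i c =
      ((pvSiftB fB arr n i).1, c + 3 * (pvSiftB fB arr n i).2 + 2) := by
  induction fA with
  | zero => intro fB arr n i c h0 h1 h2 h3; omega
  | succ fA ih =>
    intro fB arr n i c h0 h1 h2 h3
    cases fB with
    | zero => omega
    | succ fB =>
      simp only [floyd_heapifyA, pvSiftB]
      have e2 : (2 * i + 1 + 1 : Int) = 2 * i + 2 := by ring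
      rw [e2]
      simp only [apply_ite (fun j => PySem.List.pyGetD arr j 0)]
      generalize PySem.List.pyGetD arr (2 * i + 1) 0 = L
      generalize PySem.List.pyGetD arr (2 * i + 2) 0 = R
      generalize PySem.List.pyGetD arr i 0 = V
      split_ifs <;>
        first
        | (exfalso; omega)
        | (refine Prod.ext rfl ?_; omega)
        | (rw [ih fB _ n (2 * i + 2) (c + 1 + 1 + 1) (by omega) (by omega) (by omega) (by omega)]
           refine Prod.ext rfl ?_; omega)
        | (rw [ih fB _ n (2 * i + 1) (c + 1 + 1 + 1) (by omega) (by omega) (by omega) (by omega)]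
           refine Prod.ext rfl ?_; omega)

-- Build-phase loop: A's (array, ops) fold matches B's (array, calls, swaps) fold.
theorem loop1_rel (n : Int) (F : Nat) (hF : n ≤ (F : Int)) :
    ∀ (l : List Int) (arr : List Int) (calls swaps : Int), (∀ i ∈ l, 0 ≤ i ∧ i < n) →
    l.foldl (fun st i => floyd_heapifyA F st.1 n i st.2) (arr, 3 * swaps + 2 * calls) =
      ((l.foldl (fun (st : List Int × Int × Int) i =>
          let r := pvSiftB F st.1 n i
          (r.1, st.2.1 + 1, st.2.2 + r.2)) (arr, calls, swaps)).1,
       3 * (l.foldl (fun (st : List Int × Int × Int) i =>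
          let r := pvSiftB F st.1 n i
          (r.1, st.2.1 + 1, st.2.2 + r.2)) (arr, calls, swaps)).2.2 +
       2 * (l.foldl (fun (st : List Int × Int × Int) i =>
          let r := pvSiftB F st.1 n i
          (r.1, st.2.1 + 1, st.2.2 + r.2)) (arr, calls, swaps)).2.1) := by
  intro l
  induction l with
  | nil => intro arr calls swaps _; simp
  | cons i l ih =>
    intro arr calls swaps hmem
    obtain ⟨h0, h1⟩ := hmem i (List.mem_cons_self ..)
    simp only [List.foldl_cons]
    rw [heapifyA_eq_sift F F arr n i (3 * swaps + 2 * calls) h0 h1 (by omega) (by omega)]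
    have : 3 * swaps + 2 * calls + 3 * (pvSiftB F arr n i).2 + 2 =
        3 * (swaps + (pvSiftB F arr n i).2) + 2 * (calls + 1) := by ring
    rw [this]
    exact ih _ _ _ (fun j hj => hmem j (List.mem_cons_of_mem _ hj))

-- Extract-phase loop: heap size is the loop index, sift always starts at the root.
theorem loop2_rel (F : Nat) :
    ∀ (l : List Int) (arr : List Int) (calls swaps : Int), (∀ i ∈ l, 0 < i ∧ i ≤ (F : Int)) →
    l.foldl (fun st i => floyd_heapifyA F (pvSwap st.1 i 0) i 0 st.2) (arr, 3 * swaps + 2 * calls) =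
      ((l.foldl (fun (st : List Int × Int × Int) i =>
          let r := pvSiftB F (pvSwap st.1 i 0) i 0
          (r.1, st.2.1 + 1, st.2.2 + r.2)) (arr, calls, swaps)).1,
       3 * (l.foldl (fun (st : List Int × Int × Int) i =>
          let r := pvSiftB F (pvSwap st.1 i 0) i 0
          (r.1, st.2.1 + 1, st.2.2 + r.2)) (arr, calls, swaps)).2.2 +
       2 * (l.foldl (fun (st : List Int × Int × Int) i =>
          let r := pvSiftB F (pvSwap st.1 i 0) i 0
          (r.1, st.2.1 + 1, st.2.2 + r.2)) (arr, calls, swaps)).2.1) := by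
  intro l
  induction l with
  | nil => intro arr calls swaps _; simp
  | cons i l ih =>
    intro arr calls swaps hmem
    obtain ⟨h0, h1⟩ := hmem i (List.mem_cons_self ..)
    simp only [List.foldl_cons]
    rw [heapifyA_eq_sift F F (pvSwap arr i 0) i 0 (3 * swaps + 2 * calls) le_rfl h0 (by omega) (by omega)]
    have : 3 * swaps + 2 * calls + 3 * (pvSiftB F (pvSwap arr i 0) i 0).2 + 2 =
        3 * (swaps + (pvSiftB F (pvSwap arr i 0) i 0).2) + 2 * (calls + 1) := by ring
    rw [this]
    exact ih _ _ _ (fun j hj => hmem j (List.mem_cons_of_mem _ hj))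

-- ===== VERDICT (by name: the statement is the Claim_ definition above) =====
theorem floyd_heap_sort_spec : Claim_equal_floyd_heap_sort := by
  intro arr _
  unfold Spec_floyd_heap_sort floyd_heap_sort floyd_heap_sort_alt
  simp only []
  have hmem1 : ∀ i ∈ PySem.List.pyRange (PySem.Int.floordiv (arr.length : Int) 2 - 1) (-1) (-1),
      0 ≤ i ∧ i < (arr.length : Int) := by
    intro i hi
    rw [PySem.List.mem_pyRange_neg_one] at hi
    have := PySem.Int.floordiv_eq_ediv_of_pos (a := (arr.length : Int)) (b := 2) (by omega)
    omega
  have hmem2 : ∀ i ∈ PySem.List.pyRange ((arr.length : Int) - 1) 0 (-1),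
      0 < i ∧ i ≤ ((arr.length + 1 : Nat) : Int) := by
    intro i hi
    rw [PySem.List.mem_pyRange_neg_one] at hi
    push_cast
    omega
  have h0 : ((arr, (0 : Int)) : List Int × Int) = (arr, 3 * 0 + 2 * 0) := by norm_num
  rw [h0, loop1_rel (arr.length : Int) (arr.length + 1) (by push_cast; omega) _ arr 0 0 hmem1]
  rw [loop2_rel (arr.length + 1) _ _ _ _ hmem2]
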